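-- pv_equiv track=rewrite | github.com/douglasbolis/PROG2 | manipula_textos/atividades_arquivos/libplnbsi.py | anterior
-- ===== SOURCE A (Python) =====
-- def corrente(pTexto, ppos, strSep):
--
--     if (pTexto[ppos] in strSep):
--         return None
--     else:
--         i = ppos
--         while (i >= 0) and (pTexto[i] not in strSep):
--             i -= 1
--         #fim while
--         j = ppos
--         while (j < len(pTexto)) and (pTexto[j] not in strSep):
--             j += 1
--         #fim while
--         return pTexto[i+1:j]
--
-- def anterior(pTexto, ppos, strSep):
--     i = ppos
--
--     if (pTexto[i] not in strSep):
--         while (i >= 0) and (pTexto[i] not in strSep):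
--             i -= 1
--         #fim while
--     while (i >= 0) and (pTexto[i] in strSep):
--         i -= 1
--     #fim while
--
--     if i < 0:
--         return None
--     else:
--         return corrente(pTexto, i, strSep)
-- ===== SOURCE B (Python) =====
-- def anterior(pTexto, ppos, strSep):
--     pTexto[ppos]  # same IndexError as A on an out-of-range position
--     # Single forward scan: collect (start, end) spans of maximal non-separator runs,
--     # then answer with the last token that ends at or before ppos.
--     spans = []
--     start = None
--     for k, c in enumerate(pTexto):
--         if c not in strSep:
--             if start is None:
--                 start = k
--         else:
--             if start is not None:
--                 spans.append((start, k))
--                 start = None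
--     if start is not None:
--         spans.append((start, len(pTexto)))
--     best = None
--     for s, e in spans:
--         if e <= ppos:
--             best = (s, e)
--     if best is None:
--         return None
--     return pTexto[best[0]:best[1]]
-- ===== Notes on version B (the rewrite author's own statement) =====
-- stated objective: alternative
-- what changed: Replaces A's three backward character-by-character scans plus a full rescan in corrente() with a single forward pass that collects (start,end) token spans and then selects the last span ending at or before ppos.
import Mathlib
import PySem

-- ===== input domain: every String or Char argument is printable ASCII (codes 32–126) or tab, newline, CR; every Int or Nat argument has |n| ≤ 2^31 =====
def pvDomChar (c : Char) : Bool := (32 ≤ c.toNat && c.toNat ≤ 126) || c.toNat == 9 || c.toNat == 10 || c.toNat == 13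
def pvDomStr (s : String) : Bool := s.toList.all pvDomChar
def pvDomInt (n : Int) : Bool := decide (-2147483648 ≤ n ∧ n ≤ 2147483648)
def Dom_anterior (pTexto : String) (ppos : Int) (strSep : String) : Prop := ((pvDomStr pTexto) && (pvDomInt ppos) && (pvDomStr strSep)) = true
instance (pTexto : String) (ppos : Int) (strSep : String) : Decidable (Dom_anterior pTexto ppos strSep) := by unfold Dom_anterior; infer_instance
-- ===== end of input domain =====

-- B replaces A's backward scans (plus corrente's rescan) by one forward pass building token
-- spans and picking the last span ending at or before ppos; equal return values on all
-- in-range positions (Pre_), A raises IndexError outside.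

-- ===== PORT A =====
-- while (i >= 0) and (pTexto[i] not in strSep): i -= 1
def aScanTok (cs sep : List Char) (i : Int) : Int :=
  if h : 0 ≤ i ∧ ((PySem.List.pyGet? cs i).any fun c => !(sep.contains c)) = true then
    aScanTok cs sep (i - 1)
  else i
termination_by (i + 1).toNat
decreasing_by omega

-- while (i >= 0) and (pTexto[i] in strSep): i -= 1
def aScanSep (cs sep : List Char) (i : Int) : Int :=
  if h : 0 ≤ i ∧ ((PySem.List.pyGet? cs i).any fun c => sep.contains c) = true then
    aScanSep cs sep (i - 1)
  else i
termination_by (i + 1).toNat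
decreasing_by omega

-- while (j < len(pTexto)) and (pTexto[j] not in strSep): j += 1
def aScanEnd (cs sep : List Char) (j : Int) : Int :=
  if h : j < (cs.length : Int) ∧ ((PySem.List.pyGet? cs j).any fun c => !(sep.contains c)) = true then
    aScanEnd cs sep (j + 1)
  else j
termination_by ((cs.length : Int) - j).toNat
decreasing_by omega

def corrente (pTexto : String) (ppos : Int) (strSep : String) : Option String :=
  let cs := pTexto.toList
  let sep := strSep.toList
  match PySem.List.pyGet? cs ppos with
  | none => none   -- pTexto[ppos] IndexError (never reached from anterior under Pre_)
  | some c =>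
    if sep.contains c then none
    else
      let i := aScanTok cs sep ppos
      let j := aScanEnd cs sep ppos
      some (String.ofList (PySem.List.slice cs (some (i + 1)) (some j)))

def anterior (pTexto : String) (ppos : Int) (strSep : String) : Option String :=
  let cs := pTexto.toList
  let sep := strSep.toList
  match PySem.List.pyGet? cs ppos with
  | none => none   -- pTexto[i] IndexError, excluded by Pre_
  | some c =>
    let i0 := if !(sep.contains c) then aScanTok cs sep ppos else ppos
    let i1 := aScanSep cs sep i0
    if i1 < 0 then none else corrente pTexto i1 strSep

-- ===== PORT B =====
def anterior_alt (pTexto : String) (ppos : Int) (strSep : String) : Option String :=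
  let cs := pTexto.toList
  let sep := strSep.toList
  match PySem.List.pyGet? cs ppos with
  | none => none   -- pTexto[ppos] IndexError, excluded by Pre_
  | some _ =>
  let st := (PySem.List.enumerate cs 0).foldl
    (fun (st : List (Int × Int) × Option Int) kc =>
      if !(sep.contains kc.2) then
        match st.2 with
        | none => (st.1, some kc.1)
        | some _ => st
      else
        match st.2 with
        | some s => (st.1 ++ [(s, kc.1)], none)
        | none => st)
    ([], none)
  let spans := match st.2 with
    | some s => st.1 ++ [(s, (cs.length : Int))]
    | none => st.1
  let best := spans.foldl (fun b se => if se.2 ≤ ppos then some se else b) none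
  match best with
  | none => none
  | some se => some (String.ofList (PySem.List.slice cs (some se.1) (some se.2)))

-- ===== PRECONDITION & SPEC =====
-- Pre_ excludes exactly the inputs where A raises IndexError on pTexto[ppos] (ppos out of range).
def Pre_anterior (pTexto : String) (ppos : Int) (strSep : String) : Prop :=
  PySem.Raise.InRange pTexto.toList.length ppos
instance (pTexto : String) (ppos : Int) (strSep : String) : Decidable (Pre_anterior pTexto ppos strSep) := by
  unfold Pre_anterior; infer_instance

def pvWitness_anterior : String × Int × String := ("ab cd", 4, " ")

def Spec_anterior (pTexto : String) (ppos : Int) (strSep : String) (out : Option String) : Prop := out = anterior_alt pTexto ppos strSep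
instance (pTexto : String) (ppos : Int) (strSep : String) (out : Option String) : Decidable (Spec_anterior pTexto ppos strSep out) := by unfold Spec_anterior; infer_instance

-- ===== CLAIM (what is proved, stated in full; the proofs are below) =====
def Claim_equal_anterior : Prop := ∀ (pTexto : String) (ppos : Int) (strSep : String), Dom_anterior pTexto ppos strSep → Pre_anterior pTexto ppos strSep → Spec_anterior pTexto ppos strSep (anterior pTexto ppos strSep)

-- ===== LEMMAS AND PROOFS =====

-- character classes at an index (only used for indices < cs.length)
def isSepAt (cs sep : List Char) (j : Nat) : Bool := sep.contains (cs.getD j ' ')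
def isTokAt (cs sep : List Char) (j : Nat) : Bool := !(isSepAt cs sep j)

-- greatest j ≤ i with P j
def lastP (P : Nat → Bool) : Nat → Option Nat
  | 0 => if P 0 then some 0 else none
  | k+1 => if P (k+1) then some (k+1) else lastP P k

def optInt : Option Nat → Int
  | none => -1
  | some r => (r : Int)

-- first j' ≥ j with P j', else cs.length
def nextP (cs : List Char) (P : Nat → Bool) (j : Nat) : Nat :=
  if h : j < cs.length then (if P j then j else nextP cs P (j + 1)) else j
termination_by cs.length - j

def startOfRun (cs sep : List Char) (t : Nat) : Int := optInt (lastP (isSepAt cs sep) t) + 1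

-- index of the last character of the previous token, looking at the prefix of length k
def i1star (cs sep : List Char) : Nat → Option Nat
  | 0 => none
  | k+1 => (lastP (isSepAt cs sep) k).bind (lastP (isTokAt cs sep))

-- reference for B's fold state after k characters
def bCur (cs sep : List Char) : Nat → Option Int
  | 0 => none
  | k+1 => if isTokAt cs sep k then some ((bCur cs sep k).getD (k : Int)) else none

def bSpans (cs sep : List Char) : Nat → List (Int × Int)
  | 0 => []
  | k+1 =>
    if isTokAt cs sep k then bSpans cs sep k
    else match bCur cs sep k with
      | some s => bSpans cs sep k ++ [(s, (k : Int))]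
      | none => bSpans cs sep k

theorem lastP_spec_some (P : Nat → Bool) (i r : Nat) (h : lastP P i = some r) :
    r ≤ i ∧ P r = true ∧ ∀ j, r < j → j ≤ i → P j = false := by
  induction i with
  | zero =>
    unfold lastP at h
    by_cases h0 : P 0 = true <;> simp [h0] at h
    subst h; exact ⟨le_refl _, h0, fun j hj hj' => absurd (Nat.lt_of_lt_of_le hj hj') (lt_irrefl _)⟩
  | succ k ih =>
    unfold lastP at h
    by_cases hk : P (k+1) = true
    · simp [hk] at h; subst h
      exact ⟨le_refl _, hk, fun j hj hj' => absurd (Nat.lt_of_lt_of_le hj hj') (lt_irrefl _)⟩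
    · simp [hk] at h
      obtain ⟨h1, h2, h3⟩ := ih h
      refine ⟨Nat.le_succ_of_le h1, h2, fun j hj hj' => ?_⟩
      rcases Nat.lt_or_ge j (k+1) with hlt | hge
      · exact h3 j hj (by omega)
      · have : j = k + 1 := by omega
        subst this; simpa using hk

theorem lastP_self (P : Nat → Bool) (i : Nat) (h : P i = true) : lastP P i = some i := by
  cases i <;> simp [lastP, h]

-- A's loops compute lastP / nextP
theorem anyTok_eq (cs sep : List Char) (i : Nat) (h : i < cs.length) :
    ((PySem.List.pyGet? cs (i : Int)).any fun c => !(sep.contains c)) = isTokAt cs sep i := by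
  rw [PySem.List.pyGet?_natCast, List.getElem?_eq_getElem h]
  unfold isTokAt isSepAt
  rw [List.getD_eq_getElem cs ' ' h]
  rfl

theorem anySep_eq (cs sep : List Char) (i : Nat) (h : i < cs.length) :
    ((PySem.List.pyGet? cs (i : Int)).any fun c => sep.contains c) = isSepAt cs sep i := by
  rw [PySem.List.pyGet?_natCast, List.getElem?_eq_getElem h]
  unfold isSepAt
  rw [List.getD_eq_getElem cs ' ' h]
  rfl

theorem notTok_isSep (cs sep : List Char) (i : Nat) (h : ¬ isTokAt cs sep i = true) :
    isSepAt cs sep i = true := by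
  cases hx : isSepAt cs sep i with
  | true => rfl
  | false => exact absurd (by simp [isTokAt, hx]) h

theorem bSpans_succ (cs sep : List Char) (k : Nat) :
    bSpans cs sep (k+1) = if isTokAt cs sep k then bSpans cs sep k
      else match bCur cs sep k with
        | some s => bSpans cs sep k ++ [(s, (k : Int))]
        | none => bSpans cs sep k := rfl

theorem bCur_succ (cs sep : List Char) (k : Nat) :
    bCur cs sep (k+1) = if isTokAt cs sep k then some ((bCur cs sep k).getD (k : Int)) else none := rfl

theorem i1star_succ (cs sep : List Char) (k : Nat) :
    i1star cs sep (k+1) = (lastP (isSepAt cs sep) k).bind (lastP (isTokAt cs sep)) := rfl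

theorem aScanTok_eq (cs sep : List Char) (i : Nat) (h : i < cs.length) :
    aScanTok cs sep (i : Int) = optInt (lastP (isSepAt cs sep) i) := by
  revert h
  induction i with
  | zero =>
    intro h
    rw [aScanTok]
    simp only [anyTok_eq cs sep 0 h]
    by_cases ht : isTokAt cs sep 0 = true
    · have hs : isSepAt cs sep 0 = false := by simpa [isTokAt] using ht
      rw [dif_pos ⟨by norm_num, ht⟩, aScanTok, dif_neg (by norm_num)]
      simp [lastP, hs, optInt]
    · have hs := notTok_isSep cs sep 0 ht
      rw [dif_neg (by simp [ht])]
      simp [lastP, hs, optInt]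
  | succ k ih =>
    intro h
    rw [aScanTok]
    simp only [anyTok_eq cs sep (k+1) h]
    by_cases ht : isTokAt cs sep (k+1) = true
    · have hs : isSepAt cs sep (k+1) = false := by simpa [isTokAt] using ht
      rw [dif_pos ⟨by positivity, ht⟩,
        show ((k+1 : Nat) : Int) - 1 = (k : Int) by push_cast; ring,
        ih (by omega)]
      simp [lastP, hs]
    · have hs := notTok_isSep cs sep (k+1) ht
      rw [dif_neg (by simp [ht]), lastP_self _ _ hs]
      rfl

theorem aScanSep_eq (cs sep : List Char) (i : Nat) (h : i < cs.length) :
    aScanSep cs sep (i : Int) = optInt (lastP (isTokAt cs sep) i) := by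
  revert h
  induction i with
  | zero =>
    intro h
    rw [aScanSep]
    simp only [anySep_eq cs sep 0 h]
    by_cases hs : isSepAt cs sep 0 = true
    · have ht : isTokAt cs sep 0 = false := by simp [isTokAt, hs]
      rw [dif_pos ⟨by norm_num, hs⟩, aScanSep, dif_neg (by norm_num)]
      simp [lastP, ht, optInt]
    · have ht : isTokAt cs sep 0 = true := by
        cases hx : isSepAt cs sep 0 with
        | false => simp [isTokAt, hx]
        | true => exact absurd hx hs
      rw [dif_neg (by simp [hs]), lastP_self _ _ ht]
      rfl
  | succ k ih =>
    intro h
    rw [aScanSep]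
    simp only [anySep_eq cs sep (k+1) h]
    by_cases hs : isSepAt cs sep (k+1) = true
    · have ht : isTokAt cs sep (k+1) = false := by simp [isTokAt, hs]
      rw [dif_pos ⟨by positivity, hs⟩,
        show ((k+1 : Nat) : Int) - 1 = (k : Int) by push_cast; ring,
        ih (by omega)]
      simp [lastP, ht]
    · have ht : isTokAt cs sep (k+1) = true := by
        cases hx : isSepAt cs sep (k+1) with
        | false => simp [isTokAt, hx]
        | true => exact absurd hx hs
      rw [dif_neg (by simp [hs]), lastP_self _ _ ht]
      rfl

theorem aScanEnd_eq (cs sep : List Char) (j : Nat) (h : j ≤ cs.length) :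
    aScanEnd cs sep (j : Int) = ((nextP cs (isSepAt cs sep) j : Nat) : Int) := by
  generalize hd : cs.length - j = d
  induction d generalizing j with
  | zero =>
    have hj : j = cs.length := by omega
    subst hj
    rw [aScanEnd, dif_neg (by simp), nextP, dif_neg (by omega)]
  | succ d ih =>
    have hj : j < cs.length := by omega
    rw [aScanEnd, nextP, dif_pos hj]
    simp only [anyTok_eq cs sep j hj]
    by_cases hs : isSepAt cs sep j = true
    · have ht : isTokAt cs sep j = false := by simp [isTokAt, hs]
      rw [dif_neg (by simp [ht]), if_pos hs]
    · have ht : isTokAt cs sep j = true := by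
        cases hx : isSepAt cs sep j with
        | false => simp [isTokAt, hx]
        | true => exact absurd hx hs
      rw [dif_pos ⟨by exact_mod_cast hj, ht⟩, if_neg hs,
        show ((j : Nat) : Int) + 1 = ((j + 1 : Nat) : Int) by push_cast; ring,
        ih (j+1) (by omega) (by omega)]

-- A's rendered result
theorem corrente_eq (pTexto : String) (strSep : String) (t : Nat)
    (ht : t < pTexto.toList.length)
    (htok : isTokAt pTexto.toList strSep.toList t = true)
    (hnext : isSepAt pTexto.toList strSep.toList (t+1) = true)
    (ht1 : t + 1 < pTexto.toList.length) :
    corrente pTexto (t : Int) strSep =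
      some (String.ofList (PySem.List.slice pTexto.toList
        (some (startOfRun pTexto.toList strSep.toList t)) (some ((t : Int) + 1)))) := by
  unfold corrente
  dsimp only
  rw [PySem.List.pyGet?_natCast, List.getElem?_eq_getElem ht]
  have hsc : strSep.toList.contains pTexto.toList[t] = false := by
    have h2 := htok
    unfold isTokAt isSepAt at h2
    rw [List.getD_eq_getElem _ _ ht] at h2
    simpa using h2
  have hst : isSepAt pTexto.toList strSep.toList t = false := by simpa [isTokAt] using htok
  simp only [hsc, Bool.false_eq_true, if_false]
  rw [aScanTok_eq _ _ t ht, aScanEnd_eq _ _ t (by omega)]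
  have hnp : nextP pTexto.toList (isSepAt pTexto.toList strSep.toList) t = t + 1 := by
    rw [nextP, dif_pos ht, if_neg (by simp [hst]), nextP, dif_pos ht1, if_pos hnext]
  rw [hnp, show ((t + 1 : Nat) : Int) = (t : Int) + 1 from by push_cast; ring]
  rfl

theorem tail_from_q (pTexto : String) (strSep : String) (q : Nat)
    (hq : q < pTexto.toList.length)
    (hsepq : isSepAt pTexto.toList strSep.toList q = true) :
    (if aScanSep pTexto.toList strSep.toList (q : Int) < 0 then none
     else corrente pTexto (aScanSep pTexto.toList strSep.toList (q : Int)) strSep) =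
      match lastP (isTokAt pTexto.toList strSep.toList) q with
      | none => none
      | some t => some (String.ofList (PySem.List.slice pTexto.toList
          (some (startOfRun pTexto.toList strSep.toList t)) (some ((t : Int) + 1)))) := by
  rw [aScanSep_eq _ _ q hq]
  cases htq : lastP (isTokAt pTexto.toList strSep.toList) q with
  | none => simp [optInt]
  | some t =>
    obtain ⟨ht1, ht2, ht3⟩ := lastP_spec_some _ _ _ htq
    have hqtok : isTokAt pTexto.toList strSep.toList q = false := by simp [isTokAt, hsepq]
    have htlt : t < q := by
      rcases Nat.lt_or_ge t q with hlt | hge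
      · exact hlt
      · have he : t = q := by omega
        rw [he, hqtok] at ht2
        exact absurd ht2 (by simp)
    have hnext : isSepAt pTexto.toList strSep.toList (t+1) = true :=
      notTok_isSep _ _ _ (by rw [ht3 (t+1) (by omega) (by omega)]; simp)
    rw [show optInt (some t) = ((t : Nat) : Int) from rfl,
      if_neg (not_lt.mpr (Int.natCast_nonneg t))]
    exact corrente_eq pTexto strSep t (by omega) ht2 hnext (by omega)

theorem anterior_eq_ref (pTexto : String) (p : Nat) (strSep : String)
    (h : p < pTexto.toList.length) :
    anterior pTexto (p : Int) strSep =
      match i1star pTexto.toList strSep.toList (p + 1) with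
      | none => none
      | some t => some (String.ofList (PySem.List.slice pTexto.toList
          (some (startOfRun pTexto.toList strSep.toList t)) (some ((t : Int) + 1)))) := by
  unfold anterior
  dsimp only
  rw [PySem.List.pyGet?_natCast, List.getElem?_eq_getElem h]
  have hgd : pTexto.toList.getD p ' ' = pTexto.toList[p] := List.getD_eq_getElem _ _ h
  have hbr : (!(strSep.toList.contains pTexto.toList[p])) = isTokAt pTexto.toList strSep.toList p := by
    unfold isTokAt isSepAt
    rw [hgd]
  dsimp only
  rw [hbr, i1star_succ]
  by_cases ht : isTokAt pTexto.toList strSep.toList p = true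
  · rw [if_pos ht, aScanTok_eq _ _ p h]
    cases hq : lastP (isSepAt pTexto.toList strSep.toList) p with
    | none =>
      have ha : aScanSep pTexto.toList strSep.toList (-1) = -1 := by
        rw [aScanSep, dif_neg (fun hc => absurd hc.1 (by norm_num))]
      rw [show optInt none = (-1 : Int) from rfl, ha]
      norm_num
    | some q =>
      obtain ⟨hq1, hq2, _⟩ := lastP_spec_some _ _ _ hq
      rw [show optInt (some q) = ((q : Nat) : Int) from rfl,
        tail_from_q pTexto strSep q (by omega) hq2]
      rfl
  · have hsp := notTok_isSep _ _ _ ht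
    rw [if_neg ht, lastP_self _ _ hsp,
      tail_from_q pTexto strSep p h hsp]
    rfl

-- B's fold equals the reference state
theorem fold_eq (cs sep : List Char) :
    (PySem.List.enumerate cs 0).foldl
      (fun (st : List (Int × Int) × Option Int) kc =>
        if !(sep.contains kc.2) then
          match st.2 with
          | none => (st.1, some kc.1)
          | some _ => st
        else
          match st.2 with
          | some s => (st.1 ++ [(s, kc.1)], none)
          | none => st)
      ([], none) = (bSpans cs sep cs.length, bCur cs sep cs.length) := by
  suffices hinv : ∀ d k, k ≤ cs.length → cs.length - k = d →
      (PySem.List.enumerate (cs.drop k) (k : Int)).foldl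
        (fun (st : List (Int × Int) × Option Int) kc =>
          if !(sep.contains kc.2) then
            match st.2 with
            | none => (st.1, some kc.1)
            | some _ => st
          else
            match st.2 with
            | some s => (st.1 ++ [(s, kc.1)], none)
            | none => st)
        (bSpans cs sep k, bCur cs sep k) = (bSpans cs sep cs.length, bCur cs sep cs.length) by
    have := hinv cs.length 0 (by omega) (by omega)
    simpa [bSpans, bCur] using this
  intro d
  induction d with
  | zero =>
    intro k hk hd
    have : k = cs.length := by omega
    subst this
    simp
  | succ d ih =>
    intro k hk hd
    have hklt : k < cs.length := by omega
    rw [show cs.drop k = cs[k] :: cs.drop (k+1) from (List.getElem_cons_drop hklt).symm,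
      PySem.List.enumerate_cons, List.foldl_cons]
    have hgetd : cs.getD k ' ' = cs[k] := List.getD_eq_getElem cs ' ' hklt
    have heq : (fun (st : List (Int × Int) × Option Int) kc =>
          if !(sep.contains kc.2) then
            match st.2 with
            | none => (st.1, some kc.1)
            | some _ => st
          else
            match st.2 with
            | some s => (st.1 ++ [(s, kc.1)], none)
            | none => st) (bSpans cs sep k, bCur cs sep k) ((k : Int), cs[k]) = (bSpans cs sep (k+1), bCur cs sep (k+1)) := by
      show (if (!(sep.contains cs[k])) = true then
          match bCur cs sep k with
          | none => (bSpans cs sep k, some (k : Int))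
          | some _ => (bSpans cs sep k, bCur cs sep k)
        else
          match bCur cs sep k with
          | some s => (bSpans cs sep k ++ [(s, (k : Int))], none)
          | none => (bSpans cs sep k, bCur cs sep k)) = (bSpans cs sep (k+1), bCur cs sep (k+1))
      rw [show (!(sep.contains cs[k])) = isTokAt cs sep k from by unfold isTokAt isSepAt; rw [hgetd]]
      rw [bSpans_succ, bCur_succ]
      by_cases ht : isTokAt cs sep k = true
      · rw [if_pos ht, if_pos ht, if_pos ht]
        cases bCur cs sep k <;> rfl
      · rw [if_neg ht, if_neg ht, if_neg ht]
        cases bCur cs sep k <;> rfl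
    rw [show (k : Int) + 1 = ((k+1 : Nat) : Int) from by push_cast; ring]
    exact (congrArg (fun (init : List (Int × Int) × Option Int) =>
        List.foldl (fun (st : List (Int × Int) × Option Int) (kc : Int × Char) =>
          if !(sep.contains kc.2) then
            match st.2 with
            | none => (st.1, some kc.1)
            | some _ => st
          else
            match st.2 with
            | some s => (st.1 ++ [(s, kc.1)], none)
            | none => st) init (PySem.List.enumerate (cs.drop (k+1)) ((k+1 : Nat) : Int))) heq).trans
      (ih (k+1) (by omega) (by omega))

theorem bCur_char (cs sep : List Char) (k : Nat) :
    bCur cs sep (k + 1) = if isTokAt cs sep k then some (startOfRun cs sep k) else none := by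
  induction k with
  | zero =>
    by_cases h0 : isTokAt cs sep 0 = true
    · have hs : isSepAt cs sep 0 = false := by simpa [isTokAt] using h0
      simp [bCur, h0, startOfRun, lastP, hs, optInt]
    · simp [bCur, h0]
  | succ k ih =>
    by_cases hk1 : isTokAt cs sep (k+1) = true
    · have hs1 : isSepAt cs sep (k+1) = false := by simpa [isTokAt] using hk1
      rw [show bCur cs sep (k+1+1) = if isTokAt cs sep (k+1) then some ((bCur cs sep (k+1)).getD ((k+1 : Nat) : Int)) else none from rfl]
      rw [ih]
      by_cases hk : isTokAt cs sep k = true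
      · simp [hk1, hk, startOfRun, lastP, hs1]
      · have hsk : isSepAt cs sep k = true := by
          cases hxe : isSepAt cs sep k with
          | true => rfl
          | false => exact absurd (by simp [isTokAt, hxe]) hk
        have hl : lastP (isSepAt cs sep) (k+1) = some k := by
          rw [show lastP (isSepAt cs sep) (k+1) = if isSepAt cs sep (k+1) then some (k+1) else lastP (isSepAt cs sep) k from rfl, if_neg (by simp [hs1])]
          exact lastP_self _ _ hsk
        simp [hk1, hk, startOfRun, hl, optInt]
    · rw [show bCur cs sep (k+1+1) = if isTokAt cs sep (k+1) then some ((bCur cs sep (k+1)).getD ((k+1 : Nat) : Int)) else none from rfl]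
      simp [hk1]

theorem bSpans_getLast (cs sep : List Char) (k : Nat) :
    (bSpans cs sep k).getLast? =
      (i1star cs sep k).map (fun t => (startOfRun cs sep t, (t : Int) + 1)) := by
  induction k with
  | zero => simp [bSpans, i1star]
  | succ k ih =>
    by_cases hk : isTokAt cs sep k = true
    · have hs : isSepAt cs sep k = false := by simpa [isTokAt] using hk
      have hspans : bSpans cs sep (k+1) = bSpans cs sep k := by
        rw [bSpans_succ, if_pos hk]
      have hstar : i1star cs sep (k+1) = i1star cs sep k := by
        cases k with
        | zero => simp [i1star, lastP, hs]
        | succ m =>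
          rw [i1star_succ, i1star_succ,
            show lastP (isSepAt cs sep) (m+1) = lastP (isSepAt cs sep) m from by simp [lastP, hs]]
      rw [hspans, hstar, ih]
    · have hsk := notTok_isSep cs sep k hk
      have hstar1 : i1star cs sep (k+1) = lastP (isTokAt cs sep) k := by
        rw [i1star_succ, lastP_self _ _ hsk]; rfl
      cases k with
      | zero =>
        have : bSpans cs sep 1 = [] := by rw [bSpans_succ, if_neg hk]; simp [bCur, bSpans]
        rw [this, hstar1]
        simp [lastP, hk]
      | succ m =>
        rw [hstar1]
        by_cases hm : isTokAt cs sep m = true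
        · have hspans : bSpans cs sep (m+1+1) = bSpans cs sep (m+1) ++ [(startOfRun cs sep m, ((m+1 : Nat) : Int))] := by
            conv_lhs => rw [bSpans_succ cs sep (m+1)]
            rw [if_neg hk, bCur_char, if_pos hm]
          have hlst : lastP (isTokAt cs sep) (m+1) = some m := by
            rw [show lastP (isTokAt cs sep) (m+1) = lastP (isTokAt cs sep) m from by simp [lastP, hk]]
            exact lastP_self _ _ hm
          rw [hspans, hlst]
          simp
        · have hspans : bSpans cs sep (m+1+1) = bSpans cs sep (m+1) := by
            conv_lhs => rw [bSpans_succ cs sep (m+1)]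
            rw [if_neg hk, bCur_char, if_neg hm]
          have hsm := notTok_isSep cs sep m hm
          have : lastP (isTokAt cs sep) (m+1) = i1star cs sep (m+1) := by
            rw [i1star_succ, lastP_self _ _ hsm,
              show lastP (isTokAt cs sep) (m+1) = lastP (isTokAt cs sep) m from by simp [lastP, hk]]
            rfl
          rw [hspans, this, ih]

theorem bSpans_end_lt (cs sep : List Char) (k : Nat) (se : Int × Int) (h : se ∈ bSpans cs sep k) :
    se.2 < (k : Int) := by
  induction k with
  | zero => simp [bSpans] at h
  | succ k ih =>
    unfold bSpans at h
    by_cases hk : isTokAt cs sep k = true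
    · simp [hk] at h; have := ih h; omega
    · simp [hk] at h
      cases hc : bCur cs sep k with
      | none => simp [hc] at h; have := ih h; omega
      | some s =>
        simp [hc, List.mem_append] at h
        rcases h with h | h
        · have := ih h; omega
        · subst h; simp

theorem bestOf_all_le (p : Int) (l : List (Int × Int)) (b : Option (Int × Int))
    (h : ∀ se ∈ l, se.2 ≤ p) :
    l.foldl (fun b se => if se.2 ≤ p then some se else b) b =
      match l.getLast? with
      | none => b
      | some x => some x := by
  induction l generalizing b with
  | nil => simp
  | cons x l ih =>
    have hx : x.2 ≤ p := h x (by simp)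
    rw [List.foldl_cons, if_pos hx, ih (some x) (fun se hse => h se (by simp [hse]))]
    cases hl : l.getLast? with
    | none =>
      have : l = [] := by cases l <;> simp_all
      subst this; simp
    | some y =>
      have : (x :: l).getLast? = some y := by
        cases l with
        | nil => simp at hl
        | cons z l => rw [List.getLast?_cons_cons]; exact hl
      simp [this]

theorem best_stable (cs sep : List Char) (p : Int) (k₁ k₂ : Nat) (h₁ : k₁ ≤ k₂) (hp : p < (k₁ : Int)) :
    (bSpans cs sep k₂).foldl (fun b se => if se.2 ≤ p then some se else b) none =
      (bSpans cs sep k₁).foldl (fun b se => if se.2 ≤ p then some se else b) none := by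
  revert h₁
  induction k₂ with
  | zero => intro h₁; rw [Nat.le_zero.mp h₁]
  | succ k ih =>
    intro h₁
    rcases Nat.lt_or_ge k₁ (k+1) with hlt | hge
    · have hk1 : k₁ ≤ k := by omega
      have hend : ¬ ((k : Int) ≤ p) := by
        have : (k₁ : Int) ≤ (k : Int) := by exact_mod_cast hk1
        omega
      conv_lhs => rw [bSpans_succ cs sep k]
      by_cases hk : isTokAt cs sep k = true
      · rw [if_pos hk]; exact ih hk1
      · rw [if_neg hk]
        cases hc : bCur cs sep k with
        | none => exact ih hk1
        | some s =>
          rw [List.foldl_append]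
          simp only [List.foldl_cons, List.foldl_nil, if_neg hend]
          exact ih hk1
    · have : k₁ = k + 1 := by omega
      subst this; rfl

theorem anterior_alt_eq_ref (pTexto : String) (ppos : Int) (strSep : String)
    (h : ppos < (pTexto.toList.length : Int)) :
    anterior_alt pTexto ppos strSep =
      match (if 0 ≤ ppos then i1star pTexto.toList strSep.toList (ppos.toNat + 1) else none) with
      | none => none
      | some t => some (String.ofList (PySem.List.slice pTexto.toList
          (some (startOfRun pTexto.toList strSep.toList t)) (some ((t : Int) + 1)))) := by
  unfold anterior_alt
  dsimp only
  cases hg : PySem.List.pyGet? pTexto.toList ppos with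
  | none =>
    rw [(PySem.List.pyGet?_eq_none_iff _ _).mp hg |> fun hnr => if_neg (fun h0 : 0 ≤ ppos => hnr (by
      unfold PySem.Raise.InRange
      omega))]
  | some c =>
  dsimp only
  rw [fold_eq]
  dsimp only
  have hbig : ∀ (l : List (Int × Int)), l = (match bCur pTexto.toList strSep.toList pTexto.toList.length with
      | some s => bSpans pTexto.toList strSep.toList pTexto.toList.length ++ [(s, (pTexto.toList.length : Int))]
      | none => bSpans pTexto.toList strSep.toList pTexto.toList.length) →
      l.foldl (fun b se => if se.2 ≤ ppos then some se else b) none =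
        (bSpans pTexto.toList strSep.toList pTexto.toList.length).foldl
          (fun b se => if se.2 ≤ ppos then some se else b) none := by
    intro l hl
    cases hc : bCur pTexto.toList strSep.toList pTexto.toList.length with
    | none => rw [hl, hc]
    | some s =>
      rw [hl, hc]
      dsimp only
      rw [List.foldl_append]
      simp only [List.foldl_cons, List.foldl_nil, if_neg (not_le.mpr h)]
  rw [hbig _ rfl]
  by_cases h0 : 0 ≤ ppos
  · have hle : ppos.toNat + 1 ≤ pTexto.toList.length := by omega
    rw [best_stable pTexto.toList strSep.toList ppos (ppos.toNat + 1) pTexto.toList.length hle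
        (by push_cast; omega)]
    rw [bestOf_all_le ppos _ none (fun se hse => by
      have := bSpans_end_lt pTexto.toList strSep.toList (ppos.toNat + 1) se hse
      push_cast at this
      omega)]
    rw [bSpans_getLast, if_pos h0]
    cases i1star pTexto.toList strSep.toList (ppos.toNat + 1) <;> rfl
  · rw [best_stable pTexto.toList strSep.toList ppos 0 pTexto.toList.length (by omega) (by omega),
      if_neg h0]
    rfl

-- ===== VERDICT (by name: the statement is the Claim_ definition above) =====
theorem anterior_spec : Claim_equal_anterior := by
  intro pTexto ppos strSep _ hpre
  unfold Spec_anterior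
  have hrange : -(pTexto.toList.length : Int) ≤ ppos ∧ ppos < (pTexto.toList.length : Int) := by
    unfold Pre_anterior PySem.Raise.InRange at hpre
    omega
  by_cases h0 : 0 ≤ ppos
  · have hlt : ppos.toNat < pTexto.toList.length := by omega
    have hcast : ((ppos.toNat : Nat) : Int) = ppos := Int.toNat_of_nonneg h0
    rw [← hcast, anterior_eq_ref pTexto ppos.toNat strSep hlt,
      anterior_alt_eq_ref pTexto ((ppos.toNat : Nat) : Int) strSep (by omega),
      if_pos (Int.natCast_nonneg ppos.toNat), Int.toNat_natCast]
  · rw [anterior_alt_eq_ref pTexto ppos strSep (by omega), if_neg h0]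
    unfold anterior
    dsimp only
    cases hpg : PySem.List.pyGet? pTexto.toList ppos with
    | none => rfl
    | some c =>
      dsimp only
      have hT : aScanTok pTexto.toList strSep.toList ppos = ppos := by
        rw [aScanTok, dif_neg (fun hc => absurd hc.1 (by omega))]
      have hS : ∀ x : Int, x = ppos → aScanSep pTexto.toList strSep.toList x = ppos := by
        intro x hx
        rw [hx, aScanSep, dif_neg (fun hc => absurd hc.1 (by omega))]
      by_cases hc2 : (!(strSep.toList.contains c)) = true
      · rw [if_pos hc2, hS _ hT, if_pos (by omega)]
      · rw [if_neg hc2, hS _ rfl, if_pos (by omega)]
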